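-- pv_equiv track=rewrite | github.com/rodartha/AIbbeyRoad | ai_road/data_generator/data_generator.py | generate_line
-- ===== SOURCE A (Python) =====
-- def generate_line(line_num, line):
--     """
--     NOTE: the line number is specified here so that the model has some semblance
--     of what line to generate when, may want to remove this later
--     """
--     prefix = "{} ".format(line_num)
--     line_embeddings = []
--     for i in range(len(line)):
--         embedding = None
--         label = None
--         if i == 0:
--             embedding = prefix
--             label = line[i]
--         else:
--             embedding = prefix + line[0:i]
--             label = line[i]
--         line_embeddings.append((embedding, label))
--
--     return line_embeddings
-- ===== SOURCE B (Python) =====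
-- def generate_line(line_num, line):
--     # Simpler: iterate over characters with a running accumulator prefix instead of
--     # indexing and re-slicing line[0:i] each iteration; no i == 0 special case.
--     acc = "{} ".format(line_num)
--     result = []
--     for ch in line:
--         result.append((acc, ch))
--         acc = acc + ch
--     return result
-- ===== Notes on version B (the rewrite author's own statement) =====
-- stated objective: simpler
-- what changed: B iterates over the characters keeping a running accumulator string instead of indexing range(len(line)) and re-slicing line[0:i] each iteration, and drops the redundant i==0 branch.
import Mathlib
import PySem

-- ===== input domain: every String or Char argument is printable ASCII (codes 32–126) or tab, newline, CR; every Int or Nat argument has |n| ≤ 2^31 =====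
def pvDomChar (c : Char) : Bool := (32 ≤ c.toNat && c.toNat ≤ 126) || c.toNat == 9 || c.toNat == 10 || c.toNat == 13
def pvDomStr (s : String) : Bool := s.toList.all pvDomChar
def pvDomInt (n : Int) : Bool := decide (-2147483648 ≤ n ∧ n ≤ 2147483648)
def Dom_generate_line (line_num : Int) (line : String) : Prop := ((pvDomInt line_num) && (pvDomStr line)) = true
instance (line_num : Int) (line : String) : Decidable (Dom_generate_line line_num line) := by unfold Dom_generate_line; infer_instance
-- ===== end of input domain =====

-- B replaces A's per-index re-slicing line[0:i] (and its i==0 special case) by a single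
-- running accumulator string extended one character per step; objective: simpler (no index arithmetic, no special case).

-- ===== PORT A =====
-- literal port of A: prefix = str(line_num) + " "; for i in range(len(line)):
--   embedding = prefix if i == 0 else prefix + line[0:i]; label = line[i]; append (embedding, label).
def generate_line (line_num : Int) (line : String) : List (String × String) :=
  let pre : List Char := PySem.Int.toChars line_num ++ [' ']
  (PySem.List.pyRange 0 (PySem.Str.len line) 1).foldl
    (fun acc i =>
      let embedding : List Char :=
        if i = 0 then pre
        else pre ++ PySem.List.slice line.toList (some 0) (some i)
      let label : List Char := [PySem.List.pyGetD line.toList i ' ']  -- line[i]; i is always in range here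
      acc ++ [(String.ofList embedding, String.ofList label)]) []

-- ===== PORT B =====
-- literal port of B's loop: for ch in line: result.append((acc, ch)); acc = acc + ch
def generate_line_alt_go (acc : List Char) : List Char → List (String × String)
  | [] => []
  | c :: cs => (String.ofList acc, String.ofList [c]) :: generate_line_alt_go (acc ++ [c]) cs

def generate_line_alt (line_num : Int) (line : String) : List (String × String) :=
  generate_line_alt_go (PySem.Int.toChars line_num ++ [' ']) line.toList

-- ===== PRECONDITION & SPEC =====
def Spec_generate_line (line_num : Int) (line : String) (out : List (String × String)) : Prop := out = generate_line_alt line_num line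
instance (line_num : Int) (line : String) (out : List (String × String)) : Decidable (Spec_generate_line line_num line out) := by unfold Spec_generate_line; infer_instance

-- ===== CLAIM (what is proved, stated in full; the proofs are below) =====
def Claim_equal_generate_line : Prop := ∀ (line_num : Int) (line : String), Dom_generate_line line_num line → Spec_generate_line line_num line (generate_line line_num line)

-- ===== LEMMAS AND PROOFS =====

-- the body of A's loop, as a function of the (Nat) index
lemma gl_map_range_eq_go (l pre : List Char) :
    (List.range l.length).map
        (fun k => (String.ofList (pre ++ l.take k), String.ofList [l.getD k ' ']))
      = generate_line_alt_go pre l := by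
  induction l generalizing pre with
  | nil => simp [generate_line_alt_go]
  | cons c cs ih =>
    simp only [List.length_cons, List.range_succ_eq_map, List.map_cons, List.map_map,
      generate_line_alt_go]
    congr 1
    · simp
    · rw [← ih (pre ++ [c])]
      apply List.map_congr_left
      intro k _
      simp

theorem generate_line_eq (line_num : Int) (line : String) :
    generate_line line_num line = generate_line_alt line_num line := by
  unfold generate_line generate_line_alt
  rw [PySem.Str.len_eq, PySem.List.pyRange_zero_natCast,
    PySem.List.foldl_append_singleton_eq_map, List.nil_append, List.map_map]
  rw [← gl_map_range_eq_go line.toList (PySem.Int.toChars line_num ++ [' '])]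
  apply List.map_congr_left
  intro k hk
  rw [List.mem_range] at hk
  simp only [Function.comp_apply, PySem.List.pyGetD_natCast]
  congr 1
  · split_ifs with h
    · have hk0 : k = 0 := by exact_mod_cast h
      subst hk0; simp
    · simp [PySem.List.slice_to_natCast]

-- ===== VERDICT (by name: the statement is the Claim_ definition above) =====
theorem generate_line_spec : Claim_equal_generate_line := by
  intro line_num line _
  exact generate_line_eq line_num line
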